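-- pv_equiv track=rewrite | github.com/andrewlott99/Kinnaird22 | coveringsystemsgenerator.py | fullpartition
-- ===== SOURCE A (Python) =====
-- def prepartition(S,k):
--   allparts = []
--   r = len(S)
--   if r == 1:
--     for i in range(0,k):
--       allparts = allparts + [[[S[0],i]]]
--   else:
--     tempS = S.copy()
--     del tempS[r-1]
--     for part in prepartition(tempS, k):
--         for i in range(0,k):
--           newpart = []
--           newpart = part + [[S[r-1], i]]
--           allparts = allparts + [newpart]
--   return allparts
--
-- def fullpartition(S,k):
--   allparts = []
--   key = prepartition(S,k)
--   for prepart in key: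
--     tracker = 0
--     part = []
--     for l in range(0,k):
--       D = []
--       for mod in prepart:
--         if mod[1] == l:
--           D = D+[mod[0]]
--       if len(D)==0:
--           tracker = 1
--       part = part + [D]
--     if tracker == 0:
--
--       allparts = allparts + [part]
--
--   return allparts
-- ===== SOURCE B (Python) =====
-- def fullpartition(S, k):
--     # Build the k blocks directly by recursing over S (first element most
--     # significant), instead of materialising every element-label table and
--     # bucketing it afterwards (same results in the same order).
--     def rec(rest, blocks):
--         if not rest:
--             return [blocks] if all(blocks) else []
--         x, tail = rest[0], rest[1:]
--         out = []
--         for l in range(k):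
--             out += rec(tail, assign(blocks, l, x))
--         return out
--     return rec(S, [[] for _ in range(k)])
--
-- def assign(blocks, l, x):
--     if not blocks:
--         return []
--     if l == 0:
--         return [blocks[0] + [x]] + blocks[1:]
--     return [blocks[0]] + assign(blocks[1:], l - 1, x)
-- ===== Notes on version B (the rewrite author's own statement) =====
-- stated objective: alternative
-- what changed: B builds the k blocks directly by one recursion over S, never materialising the k^|S| element-label pair tables that A's prepartition builds and then re-buckets with a k-by-table scan.
import Mathlib
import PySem

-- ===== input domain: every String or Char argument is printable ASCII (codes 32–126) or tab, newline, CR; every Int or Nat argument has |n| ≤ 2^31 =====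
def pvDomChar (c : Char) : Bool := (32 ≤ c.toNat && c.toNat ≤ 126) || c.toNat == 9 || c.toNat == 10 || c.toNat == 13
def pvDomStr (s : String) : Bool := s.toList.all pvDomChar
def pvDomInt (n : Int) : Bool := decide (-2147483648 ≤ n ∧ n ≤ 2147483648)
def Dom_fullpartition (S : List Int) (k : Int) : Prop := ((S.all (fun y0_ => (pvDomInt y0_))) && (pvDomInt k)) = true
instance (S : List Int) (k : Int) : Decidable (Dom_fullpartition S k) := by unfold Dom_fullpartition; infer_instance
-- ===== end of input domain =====

-- B replaces A's "enumerate all k^|S| element-label tables, then bucket each" by one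
-- recursion over S that grows the k blocks directly, so the pair tables and the
-- k-way bucketing scan disappear (alternative algorithm; return values identical).

-- ===== PORT A =====
-- prepartition(S, k): all label tables; recursion deletes the LAST element of S.
def prepartitionA (S : List Int) (k : Int) : List (List (List Int)) :=
  if S.length = 1 then
    (PySem.List.pyRange 0 k 1).foldl
      (fun allparts i => allparts ++ [[[PySem.List.pyGetD S 0 0, i]]]) []
  else if h : S = [] then
    []  -- Python raises IndexError here ('del tempS[-1]' on []); outside Pre_
  else
    (prepartitionA S.dropLast k).foldl
      (fun allparts part =>
        (PySem.List.pyRange 0 k 1).foldl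
          (fun a i => a ++ [part ++ [[PySem.List.pyGetD S ((S.length : Int) - 1) 0, i]]]) allparts)
      []
termination_by S.length
decreasing_by
  have hp : 0 < S.length := List.length_pos_of_ne_nil h
  simp [List.length_dropLast]; omega

def fullpartition (S : List Int) (k : Int) : List (List (List Int)) :=
  (prepartitionA S k).foldl
    (fun allparts prepart =>
      let st : Int × List (List Int) :=
        (PySem.List.pyRange 0 k 1).foldl
          (fun st l =>
            let D := prepart.foldl
              (fun D mod =>
                if PySem.List.pyGetD mod 1 0 = l then D ++ [PySem.List.pyGetD mod 0 0] else D) []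
            let tracker := if D.length = 0 then (1 : Int) else st.1
            (tracker, st.2 ++ [D]))
          (0, [])
      if st.1 = 0 then allparts ++ [st.2] else allparts)
    []

-- ===== PORT B =====
-- assign(blocks, l, x): append x to block number l.
def fpAssign : List (List Int) → Int → Int → List (List Int)
  | [], _, _ => []
  | b :: rest, l, x => if l = 0 then (b ++ [x]) :: rest else b :: fpAssign rest (l - 1) x

-- rec(rest, blocks)
def fpRec (k : Int) : List Int → List (List Int) → List (List (List Int))
  | [], blocks => if blocks.all (fun b => !b.isEmpty) then [blocks] else []
  | x :: tail, blocks =>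
      (PySem.List.pyRange 0 k 1).foldl (fun out l => out ++ fpRec k tail (fpAssign blocks l x)) []

def fullpartition_alt (S : List Int) (k : Int) : List (List (List Int)) :=
  fpRec k S (List.replicate k.toNat [])

-- ===== PRECONDITION & SPEC =====
-- A raises IndexError on empty S (every other input returns), so Pre_ excludes only S = [].
def Pre_fullpartition (S : List Int) (k : Int) : Prop := S ≠ []
instance (S : List Int) (k : Int) : Decidable (Pre_fullpartition S k) := by
  unfold Pre_fullpartition; infer_instance

def pvWitness_fullpartition : List Int × Int := ([1, 2], 2)

def Spec_fullpartition (S : List Int) (k : Int) (out : List (List (List Int))) : Prop :=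
  out = fullpartition_alt S k
instance (S : List Int) (k : Int) (out : List (List (List Int))) :
    Decidable (Spec_fullpartition S k out) := by unfold Spec_fullpartition; infer_instance

-- ===== CLAIM (what is proved, stated in full; the proofs are below) =====
def Claim_equal_fullpartition : Prop := ∀ (S : List Int) (k : Int), Dom_fullpartition S k →
  Pre_fullpartition S k → Spec_fullpartition S k (fullpartition S k)

-- ===== LEMMAS AND PROOFS =====

-- All label tables for S, recursing on the FRONT of S (same lexicographic order as A's
-- back recursion: earlier elements are more significant).
def pre' (k : Int) : List Int → List (List (List Int))
  | [] => [[]]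
  | x :: tail => (PySem.List.pyRange 0 k 1).flatMap (fun i => (pre' k tail).map (fun p => [x, i] :: p))

-- the elements of a table carrying label l, in table order
def bucket (pre : List (List Int)) (l : Int) : List Int :=
  pre.foldr (fun mod D => if PySem.List.pyGetD mod 1 0 = l then PySem.List.pyGetD mod 0 0 :: D else D) []

-- blocks[j] ++ bucket pre (j₀ + j), for each position j
def mergeFrom (pre : List (List Int)) : List (List Int) → Int → List (List Int)
  | [], _ => []
  | b :: rest, j => (b ++ bucket pre j) :: mergeFrom pre rest (j + 1)

-- the common shape both programs are reduced to
def specForm (S : List Int) (k : Int) : List (List (List Int)) :=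
  (pre' k S).flatMap (fun pre =>
    if ((PySem.List.pyRange 0 k 1).map (bucket pre)).any List.isEmpty then []
    else [(PySem.List.pyRange 0 k 1).map (bucket pre)])

theorem flatMap_single {α β : Type} (L : List α) (f : α → β) :
    L.flatMap (fun x => [f x]) = L.map f := by
  induction L with
  | nil => rfl
  | cons a l ih => simp [ih]

theorem flatMap_ite {α β : Type} (L : List α) (q : α → Bool) (f : α → β) :
    L.flatMap (fun x => if q x then [] else [f x]) = (L.filter (fun x => !q x)).map f := by
  induction L with
  | nil => rfl
  | cons a l ih => by_cases h : q a <;> simp [h, ih]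

theorem bucket_cons (x l : Int) (pre : List (List Int)) (j : Int) :
    bucket ([x, l] :: pre) j = if l = j then x :: bucket pre j else bucket pre j := by
  have h1 : PySem.List.pyGetD [x, l] 1 0 = l := by simp [pysem]
  have h0 : PySem.List.pyGetD [x, l] 0 0 = x := by simp [pysem]
  simp only [bucket, List.foldr_cons, h1, h0]

theorem pre'_snoc (k : Int) (T : List Int) (x : Int) :
    pre' k (T ++ [x]) =
      (pre' k T).flatMap (fun p => (PySem.List.pyRange 0 k 1).map (fun i => p ++ [[x, i]])) := by
  induction T with
  | nil => simp [pre', flatMap_single]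
  | cons y T ih =>
      simp only [List.cons_append, pre', ih, List.map_flatMap, List.flatMap_map, List.map_map,
        List.flatMap_assoc, Function.comp_def, List.cons_append]

theorem prepA_eq (k : Int) (S : List Int) : S ≠ [] → prepartitionA S k = pre' k S := by
  induction S using List.reverseRecOn with
  | nil => intro h; exact absurd rfl h
  | append_singleton T x ih =>
    intro _
    by_cases hT : T = []
    · subst hT
      simp only [List.nil_append]
      rw [prepartitionA, if_pos (by simp : ([x] : List Int).length = 1)]
      have hx : PySem.List.pyGetD [x] 0 0 = x := by simp [pysem]
      rw [PySem.List.foldl_append_singleton_eq_map]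
      simp only [List.nil_append, hx, pre', List.map_cons, List.map_nil, flatMap_single]
    · have hlen : ¬ (T ++ [x]).length = 1 := by
        have := List.length_pos_of_ne_nil hT
        simp only [List.length_append, List.length_cons, List.length_nil]; omega
      rw [prepartitionA, if_neg hlen, dif_neg (by simp)]
      rw [List.dropLast_concat]
      have hget : PySem.List.pyGetD (T ++ [x]) (((T ++ [x]).length : Int) - 1) 0 = x := by
        have h1 : (((T ++ [x]).length : Int) - 1) = ((T.length : Nat) : Int) := by
          simp [List.length_append]
        rw [h1, PySem.List.pyGetD_natCast]
        simp [List.getD]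
      rw [hget]
      simp only [PySem.List.foldl_append_singleton_eq_map, PySem.List.foldl_append_eq_flatMap,
        List.nil_append]
      rw [ih hT, pre'_snoc]

theorem bucket_foldl (pre : List (List Int)) (l : Int) (init : List Int) :
    pre.foldl (fun D mod =>
        if PySem.List.pyGetD mod 1 0 = l then D ++ [PySem.List.pyGetD mod 0 0] else D) init
      = init ++ bucket pre l := by
  induction pre generalizing init with
  | nil => simp [bucket]
  | cons m pre ih =>
      simp only [List.foldl_cons, bucket, List.foldr_cons]
      by_cases h : PySem.List.pyGetD m 1 0 = l <;> simp [h, ih, bucket]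

theorem inner_fold (g : Int → List Int) (L : List Int) (t : Int) (acc : List (List Int)) :
    L.foldl (fun (st : Int × List (List Int)) l =>
        (if (g l).length = 0 then (1 : Int) else st.1, st.2 ++ [g l])) (t, acc)
      = (if (L.map g).any List.isEmpty then 1 else t, acc ++ L.map g) := by
  induction L generalizing t acc with
  | nil => simp
  | cons l L ih =>
      simp only [List.foldl_cons, List.map_cons, List.any_cons]
      rw [ih]
      by_cases he : (g l).length = 0
      · have hnil : g l = [] := List.length_eq_zero_iff.mp he
        simp [hnil]
      · have hnil : g l ≠ [] := fun hh => he (by simp [hh])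
        have h2 : (g l).isEmpty = false := by simp [List.isEmpty_eq_false_iff, hnil]
        simp [he, h2]

theorem fullpartition_eq_spec (S : List Int) (k : Int) (hS : S ≠ []) :
    fullpartition S k = specForm S k := by
  unfold fullpartition specForm
  rw [prepA_eq k S hS]
  simp only [bucket_foldl, List.nil_append, inner_fold]
  have hcond : ∀ (c : Bool), ((if c then (1 : Int) else 0) = 0) = (c = false) := by
    intro c; cases c <;> simp
  simp only [hcond]
  rw [PySem.List.foldl_append_ite (p := fun pre =>
    (((PySem.List.pyRange 0 k 1).map (bucket pre)).any List.isEmpty) = false)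
    (f := fun pre => (PySem.List.pyRange 0 k 1).map (bucket pre))]
  rw [flatMap_ite, List.nil_append]
  apply congrArg
  apply List.filter_congr
  intro a _
  rcases Bool.eq_false_or_eq_true (((PySem.List.pyRange 0 k 1).map (bucket a)).any List.isEmpty)
    with h | h <;> rw [h] <;> rfl

theorem mergeFrom_nil (blocks : List (List Int)) (j : Int) :
    mergeFrom [] blocks j = blocks := by
  induction blocks generalizing j with
  | nil => rfl
  | cons b rest ih => simp [mergeFrom, bucket, ih]

theorem mergeFrom_skip (x l : Int) (pre : List (List Int)) :
    ∀ (blocks : List (List Int)) (j : Int), l < j →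
      mergeFrom ([x, l] :: pre) blocks j = mergeFrom pre blocks j := by
  intro blocks
  induction blocks with
  | nil => intro j _; rfl
  | cons b rest ih =>
      intro j h
      simp only [mergeFrom, bucket_cons, if_neg (by omega : ¬ l = j), ih (j + 1) (by omega)]

theorem mergeFrom_assign (x l : Int) (pre : List (List Int)) :
    ∀ (blocks : List (List Int)) (j : Int),
      mergeFrom ([x, l] :: pre) blocks j = mergeFrom pre (fpAssign blocks (l - j) x) j := by
  intro blocks
  induction blocks generalizing l with
  | nil => intro j; rfl
  | cons b rest ih =>
      intro j
      by_cases hl : l = j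
      · subst hl
        have hs := mergeFrom_skip x l pre rest (l + 1) (by omega)
        rw [show mergeFrom ([x, l] :: pre) (b :: rest) l
            = (b ++ bucket ([x, l] :: pre) l) :: mergeFrom ([x, l] :: pre) rest (l + 1) from rfl]
        rw [bucket_cons, if_pos rfl, hs]
        rw [show fpAssign (b :: rest) (l - l) x = (b ++ [x]) :: rest from by simp [fpAssign]]
        rw [show mergeFrom pre ((b ++ [x]) :: rest) l
            = ((b ++ [x]) ++ bucket pre l) :: mergeFrom pre rest (l + 1) from rfl]
        rw [List.append_cons]
      · simp only [mergeFrom, bucket_cons, if_neg hl, fpAssign,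
          if_neg (show ¬ l - j = 0 by omega)]
        have h2 : l - (j + 1) = l - j - 1 := by ring
        rw [ih l (j + 1), h2]

theorem fpRec_eq (k : Int) : ∀ (rest : List Int) (blocks : List (List Int)),
    fpRec k rest blocks = (pre' k rest).flatMap (fun pre =>
      if (mergeFrom pre blocks 0).any List.isEmpty then [] else [mergeFrom pre blocks 0]) := by
  intro rest
  induction rest with
  | nil =>
      intro blocks
      have hb : (blocks.all fun b => !b.isEmpty) = !(blocks.any List.isEmpty) := by
        induction blocks with
        | nil => rfl
        | cons b l ih => simp only [List.all_cons, List.any_cons, ih, Bool.not_or]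
      simp only [fpRec, pre', List.flatMap_cons, List.flatMap_nil, List.append_nil,
        mergeFrom_nil, hb]
      cases blocks.any List.isEmpty <;> simp
  | cons x tail ih =>
      intro blocks
      simp only [fpRec, PySem.List.foldl_append_eq_flatMap, List.nil_append, pre',
        List.flatMap_assoc, List.flatMap_map]
      congr 1
      funext l
      rw [ih (fpAssign blocks l x)]
      congr 1
      funext p
      rw [mergeFrom_assign x l p blocks 0, sub_zero]

theorem mergeFrom_replicate (pre : List (List Int)) :
    ∀ (n : Nat) (j : Int),
      mergeFrom pre (List.replicate n []) j
        = (List.range n).map (fun i : Nat => bucket pre (j + (i : Int))) := by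
  intro n
  induction n with
  | zero => intro j; rfl
  | succ n ih =>
      intro j
      rw [List.replicate_succ]
      show (([] : List Int) ++ bucket pre j) :: mergeFrom pre (List.replicate n []) (j + 1) = _
      rw [ih (j + 1), List.range_succ_eq_map, List.map_cons, List.map_map]
      congr 1
      · simp
      · apply List.map_congr_left
        intro i _
        simp only [Function.comp_apply]
        congr 1
        push_cast
        ring

theorem alt_eq_spec (S : List Int) (k : Int) :
    fullpartition_alt S k = specForm S k := by
  unfold fullpartition_alt specForm
  rw [fpRec_eq]
  congr 1
  funext pre
  rw [mergeFrom_replicate pre k.toNat 0, PySem.List.pyRange_one]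
  simp only [List.map_map, sub_zero]
  rfl

-- ===== VERDICT (by name: the statement is the Claim_ definition above) =====
theorem fullpartition_spec : Claim_equal_fullpartition := by
  intro S k _ hpre
  unfold Spec_fullpartition
  rw [fullpartition_eq_spec S k hpre, alt_eq_spec]
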